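-- pv_equiv track=rewrite | github.com/EBISPOT/ontoSPOT-annotation | src/curategpt_batch_annotate.py | parse_search_output
-- ===== SOURCE A (Python) =====
-- def parse_search_output(output: str):
--     """Parse curategpt search output and extract label, original_id, and distance."""
--     candidates = []
--     current_candidate = {}
--
--     for line in output.strip().split("\n"):
--         line = line.strip()
--         if line.startswith("##") and "DISTANCE" in line:
--             if current_candidate:
--                 candidates.append(current_candidate)
--             distance = line.split("DISTANCE:")[-1].strip()
--             current_candidate = {"distance": distance}
--         elif line.startswith("label:"):
--             current_candidate["label"] = line.split("label:", 1)[-1].strip()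
--         elif line.startswith("original_id:"):
--             current_candidate["original_id"] = line.split("original_id:", 1)[-1].strip()
--
--     if current_candidate:
--         candidates.append(current_candidate)
--
--     return candidates
-- ===== SOURCE B (Python) =====
-- def parse_search_output(output: str):
--     """Parse curategpt search output: partition lines into segments at '##…DISTANCE' headers, build one dict per segment."""
--     lines = [l.strip() for l in output.strip().split("\n")]
--     segs = []
--     cur = []
--     for l in lines:
--         if l.startswith("##") and "DISTANCE" in l:
--             segs.append(cur)
--             cur = [l]
--         else:
--             cur.append(l)
--     segs.append(cur)
--     candidates = []
--     for seg in segs: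
--         d = {}
--         for l in seg:
--             if l.startswith("##") and "DISTANCE" in l:
--                 d["distance"] = l.split("DISTANCE:")[-1].strip()
--             elif l.startswith("label:"):
--                 d["label"] = l.split("label:", 1)[-1].strip()
--             elif l.startswith("original_id:"):
--                 d["original_id"] = l.split("original_id:", 1)[-1].strip()
--         if d:
--             candidates.append(d)
--     return candidates
-- ===== Notes on version B (the rewrite author's own statement) =====
-- stated objective: alternative
-- what changed: Replaces A's single stateful loop carrying a mutable current-candidate dict with a two-phase decomposition: first partition the stripped lines into segments at '##…DISTANCE' header lines, then build each segment's dict independently and keep the non-empty ones.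
import Mathlib
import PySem

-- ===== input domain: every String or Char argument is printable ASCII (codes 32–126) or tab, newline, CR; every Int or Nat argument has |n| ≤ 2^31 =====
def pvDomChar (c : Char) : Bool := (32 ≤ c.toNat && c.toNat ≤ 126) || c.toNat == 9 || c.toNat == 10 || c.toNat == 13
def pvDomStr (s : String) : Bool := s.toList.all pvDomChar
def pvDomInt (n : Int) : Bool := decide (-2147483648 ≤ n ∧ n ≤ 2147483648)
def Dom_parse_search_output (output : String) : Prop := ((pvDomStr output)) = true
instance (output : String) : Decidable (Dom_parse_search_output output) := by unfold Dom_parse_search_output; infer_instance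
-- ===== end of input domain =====

-- B is a two-phase re-decomposition (partition into segments, then one dict per segment); same O(n) cost, no speed claim.

-- ===== PORT A =====
-- loop body of A's single for-loop: state = (candidates, current_candidate)
def pvA_step (st : List (PySem.Dict String String) × PySem.Dict String String) (raw : String) :
    List (PySem.Dict String String) × PySem.Dict String String :=
  let line := PySem.Str.strip raw
  if PySem.Str.startswith line "##" && PySem.Str.isIn "DISTANCE" line then
    let cands := if st.2.items.isEmpty then st.1 else st.1 ++ [st.2]
    let distance := PySem.Str.strip (((PySem.Str.split? line "DISTANCE:").getD []).getLastD "")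
    (cands, PySem.Dict.insert PySem.Dict.empty "distance" distance)
  else if PySem.Str.startswith line "label:" then
    (st.1, st.2.insert "label" (PySem.Str.strip (((PySem.Str.splitMax? line "label:" 1).getD []).getLastD "")))
  else if PySem.Str.startswith line "original_id:" then
    (st.1, st.2.insert "original_id" (PySem.Str.strip (((PySem.Str.splitMax? line "original_id:" 1).getD []).getLastD "")))
  else st

def parse_search_output (output : String) : List (List (String × String)) :=
  let lines := (PySem.Str.split? (PySem.Str.strip output) "\n").getD []
  let st := lines.foldl pvA_step ([], PySem.Dict.empty)
  let candidates := if st.2.items.isEmpty then st.1 else st.1 ++ [st.2]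
  candidates.map (·.items)

-- ===== PORT B =====
-- loop body of B's inner per-segment loop (lines are already stripped)
def pvB_line (d : PySem.Dict String String) (l : String) : PySem.Dict String String :=
  if PySem.Str.startswith l "##" && PySem.Str.isIn "DISTANCE" l then
    d.insert "distance" (PySem.Str.strip (((PySem.Str.split? l "DISTANCE:").getD []).getLastD ""))
  else if PySem.Str.startswith l "label:" then
    d.insert "label" (PySem.Str.strip (((PySem.Str.splitMax? l "label:" 1).getD []).getLastD ""))
  else if PySem.Str.startswith l "original_id:" then
    d.insert "original_id" (PySem.Str.strip (((PySem.Str.splitMax? l "original_id:" 1).getD []).getLastD ""))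
  else d

def pvB_segDict (seg : List String) : PySem.Dict String String :=
  seg.foldl pvB_line PySem.Dict.empty

-- loop body of B's partitioning loop: state = (segs, cur)
def pvB_part (st : List (List String) × List String) (l : String) :
    List (List String) × List String :=
  if PySem.Str.startswith l "##" && PySem.Str.isIn "DISTANCE" l then (st.1 ++ [st.2], [l])
  else (st.1, st.2 ++ [l])

-- loop body of B's outer per-segment loop
def pvB_emitStep (acc : List (PySem.Dict String String)) (seg : List String) :
    List (PySem.Dict String String) :=
  if (pvB_segDict seg).items.isEmpty then acc else acc ++ [pvB_segDict seg]

def parse_search_output_alt (output : String) : List (List (String × String)) :=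
  let lines := ((PySem.Str.split? (PySem.Str.strip output) "\n").getD []).map PySem.Str.strip
  let p := lines.foldl pvB_part ([], [])
  let segs := p.1 ++ [p.2]
  let candidates := segs.foldl pvB_emitStep []
  candidates.map (·.items)

-- ===== PRECONDITION & SPEC =====
def Spec_parse_search_output (output : String) (out : List (List (String × String))) : Prop := out = parse_search_output_alt output
instance (output : String) (out : List (List (String × String))) : Decidable (Spec_parse_search_output output out) := by unfold Spec_parse_search_output; infer_instance

-- ===== CLAIM (what is proved, stated in full; the proofs are below) =====
def Claim_equal_parse_search_output : Prop := ∀ (output : String), Dom_parse_search_output output → Spec_parse_search_output output (parse_search_output output)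

-- ===== LEMMAS AND PROOFS =====

-- emit a finished candidate dict (A's "if current_candidate: candidates.append(...)")
def pvEmitD (d : PySem.Dict String String) : List (PySem.Dict String String) :=
  if d.items.isEmpty then [] else [d]

-- A's finalisation step on its loop state
def pvFinA (st : List (PySem.Dict String String) × PySem.Dict String String) :
    List (PySem.Dict String String) :=
  if st.2.items.isEmpty then st.1 else st.1 ++ [st.2]

-- reference recursion: candidates produced from current segment cs followed by lines ls
def pvEmitR (cs : List String) : List String → List (PySem.Dict String String)
  | [] => pvEmitD (pvB_segDict cs)
  | l :: ls =>
    if PySem.Str.startswith l "##" && PySem.Str.isIn "DISTANCE" l then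
      pvEmitD (pvB_segDict cs) ++ pvEmitR [l] ls
    else pvEmitR (cs ++ [l]) ls

lemma pvFinA_eq (cands : List (PySem.Dict String String)) (d : PySem.Dict String String) :
    pvFinA (cands, d) = cands ++ pvEmitD d := by
  unfold pvFinA pvEmitD
  split
  · rw [List.append_nil]
  · rfl

lemma pvB_segDict_append (cs : List String) (l : String) :
    pvB_segDict (cs ++ [l]) = pvB_line (pvB_segDict cs) l := by
  simp only [pvB_segDict, List.foldl_append, List.foldl_cons, List.foldl_nil]

lemma pvA_step_header (cands : List (PySem.Dict String String)) (d : PySem.Dict String String)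
    (raw : String)
    (h : (PySem.Str.startswith (PySem.Str.strip raw) "##"
        && PySem.Str.isIn "DISTANCE" (PySem.Str.strip raw)) = true) :
    pvA_step (cands, d) raw = (cands ++ pvEmitD d, pvB_segDict [PySem.Str.strip raw]) := by
  unfold pvA_step pvB_segDict
  rw [List.foldl_cons, List.foldl_nil]
  unfold pvB_line pvEmitD
  rw [if_pos h, if_pos h]
  split
  · rw [List.append_nil]
  · rfl

lemma pvA_step_nonheader (cands : List (PySem.Dict String String)) (d : PySem.Dict String String)
    (raw : String)
    (h : ¬ (PySem.Str.startswith (PySem.Str.strip raw) "##"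
        && PySem.Str.isIn "DISTANCE" (PySem.Str.strip raw)) = true) :
    pvA_step (cands, d) raw = (cands, pvB_line d (PySem.Str.strip raw)) := by
  unfold pvA_step pvB_line
  rw [if_neg h, if_neg h]
  split
  · rfl
  · split <;> rfl

lemma pvA_side (ls : List String) :
    ∀ (cands : List (PySem.Dict String String)) (cs : List String),
    pvFinA (ls.foldl pvA_step (cands, pvB_segDict cs))
    = cands ++ pvEmitR cs (ls.map PySem.Str.strip) := by
  induction ls with
  | nil =>
    intro cands cs
    rw [List.foldl_nil, List.map_nil, pvEmitR, pvFinA_eq]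
  | cons l ls ih =>
    intro cands cs
    rw [List.foldl_cons, List.map_cons, pvEmitR]
    by_cases h : (PySem.Str.startswith (PySem.Str.strip l) "##"
        && PySem.Str.isIn "DISTANCE" (PySem.Str.strip l)) = true
    · rw [pvA_step_header cands _ l h, ih, if_pos h, List.append_assoc]
    · rw [pvA_step_nonheader cands _ l h, ← pvB_segDict_append, ih, if_neg h]

lemma pvB_emit_foldl (sl : List (List String)) :
    ∀ (acc : List (PySem.Dict String String)),
    sl.foldl pvB_emitStep acc
    = acc ++ sl.flatMap (fun seg => pvEmitD (pvB_segDict seg)) := by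
  induction sl with
  | nil => intro acc; rw [List.foldl_nil, List.flatMap_nil, List.append_nil]
  | cons s sl ih =>
    intro acc
    rw [List.foldl_cons, List.flatMap_cons, ih]
    unfold pvB_emitStep pvEmitD
    split
    · rw [List.nil_append]
    · rw [List.append_assoc]

lemma pvB_side (ls : List String) :
    ∀ (segs : List (List String)) (cs : List String),
    ((ls.foldl pvB_part (segs, cs)).1 ++ [(ls.foldl pvB_part (segs, cs)).2]).flatMap
        (fun seg => pvEmitD (pvB_segDict seg))
    = segs.flatMap (fun seg => pvEmitD (pvB_segDict seg)) ++ pvEmitR cs ls := by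
  induction ls with
  | nil =>
    intro segs cs
    rw [List.foldl_nil, pvEmitR]
    simp only [List.flatMap_append, List.flatMap_cons, List.flatMap_nil, List.append_nil]
  | cons l ls ih =>
    intro segs cs
    rw [List.foldl_cons, pvEmitR]
    by_cases h : (PySem.Str.startswith l "##" && PySem.Str.isIn "DISTANCE" l) = true
    · rw [show pvB_part (segs, cs) l = (segs ++ [cs], [l]) by
        unfold pvB_part; rw [if_pos h]]
      rw [ih, if_pos h]
      simp only [List.flatMap_append, List.flatMap_cons, List.flatMap_nil, List.append_nil,
        List.append_assoc]
    · rw [show pvB_part (segs, cs) l = (segs, cs ++ [l]) by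
        unfold pvB_part; rw [if_neg h]]
      rw [ih, if_neg h]

-- ===== VERDICT (by name: the statement is the Claim_ definition above) =====
theorem parse_search_output_spec : Claim_equal_parse_search_output := by
  intro output _
  show parse_search_output output = parse_search_output_alt output
  have e1 : parse_search_output output =
      (pvFinA (((PySem.Str.split? (PySem.Str.strip output) "\n").getD []).foldl pvA_step
        ([], PySem.Dict.empty))).map (·.items) := rfl
  have e2 : parse_search_output_alt output =
      ((((((PySem.Str.split? (PySem.Str.strip output) "\n").getD []).map
            PySem.Str.strip).foldl pvB_part ([], [])).1 ++
          [((((PySem.Str.split? (PySem.Str.strip output) "\n").getD []).map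
            PySem.Str.strip).foldl pvB_part ([], [])).2]).foldl pvB_emitStep []).map (·.items) := rfl
  have hA := pvA_side ((PySem.Str.split? (PySem.Str.strip output) "\n").getD []) [] []
  rw [show pvB_segDict ([] : List String) = PySem.Dict.empty from rfl] at hA
  have hB := pvB_side (((PySem.Str.split? (PySem.Str.strip output) "\n").getD []).map PySem.Str.strip) [] []
  rw [List.flatMap_nil, List.nil_append] at hB
  rw [e1, e2, pvB_emit_foldl, List.nil_append, hA, hB, List.nil_append]
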